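-- pv_equiv track=rewrite | github.com/c1508213670/Compilation_principle_and_Practice1 | SLR/SLR.py | ALLls
-- ===== SOURCE A (Python) =====
-- def ALLls(lst):
--     res=[]
--     start=lst[0][0]
--     for i in lst:
--         for j in i:
--             if j!='->' and j not  in res and j!=start:
--                 res.append(j)
--     return res
-- ===== SOURCE B (Python) =====
-- def ALLls(lst):
--     start = lst[0][0]
--
--     def uniq(cs):
--         # first-occurrence dedup by recursion: take the head, delete all its
--         # later occurrences from the tail, recurse; skip the start symbol
--         if not cs:
--             return []
--         c = cs[0]
--         rest = uniq([x for x in cs[1:] if x != c])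
--         return rest if c == start else [c] + rest
--
--     return uniq([j for i in lst for j in i])
-- ===== Notes on version B (the rewrite author's own statement) =====
-- stated objective: alternative
-- what changed: Replaces the accumulator with its interleaved 'not in res' membership guard by a recursion on the flattened symbol list that deletes all later occurrences of the head from the tail before recursing (no result-membership test anywhere), skipping the start symbol; the '->' guard is vacuous for single characters and dropped.
import Mathlib
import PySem

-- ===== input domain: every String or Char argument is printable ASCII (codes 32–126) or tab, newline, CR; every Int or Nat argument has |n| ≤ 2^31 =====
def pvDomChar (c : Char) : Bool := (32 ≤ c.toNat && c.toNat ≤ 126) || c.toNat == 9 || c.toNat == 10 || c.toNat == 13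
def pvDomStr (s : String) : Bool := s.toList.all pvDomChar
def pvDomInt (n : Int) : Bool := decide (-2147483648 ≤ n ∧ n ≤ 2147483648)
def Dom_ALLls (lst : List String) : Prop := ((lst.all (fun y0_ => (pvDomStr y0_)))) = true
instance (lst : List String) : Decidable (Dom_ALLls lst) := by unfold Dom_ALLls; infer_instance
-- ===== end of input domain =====

-- B replaces A's accumulator-with-membership-guard loop by a recursion that deletes later
-- duplicates from the tail (no result-membership test); same values, no speed claim.

-- ===== PORT A =====
-- Port of A: start = lst[0][0]; nested loops collecting unique one-char strings, skipping '->' and start.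
-- (outside Pre_ALLls the Python raises IndexError; the port returns [] there, which the claim never uses)
def ALLls (lst : List String) : List String :=
  match (PySem.List.pyGet? lst 0).bind (fun s => PySem.Str.pyGet? s 0) with
  | none => []
  | some start =>
    lst.foldl (fun res i =>
      i.toList.foldl (fun res j =>
        if String.ofList [j] ≠ "->" ∧ String.ofList [j] ∉ res ∧ String.ofList [j] ≠ String.ofList [start]
        then res ++ [String.ofList [j]] else res) res) []

-- ===== PORT B =====
-- Port of B's helper uniq: head first, delete its later occurrences from the tail, recurse.
def uniqB (start : Char) : List Char → List String
  | [] => []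
  | c :: cs =>
    let rest := uniqB start (cs.filter (fun x => x ≠ c))
    if c = start then rest else String.ofList [c] :: rest
termination_by l => l.length
decreasing_by
  simp only [List.length_unattach]
  exact Nat.lt_succ_of_le (le_trans (List.length_filter_le _ _) (by simp))

-- Port of B: start = lst[0][0]; uniq over the flattened character list.
def ALLls_alt (lst : List String) : List String :=
  match (PySem.List.pyGet? lst 0).bind (fun s => PySem.Str.pyGet? s 0) with
  | none => []
  | some start => uniqB start (lst.flatMap String.toList)

-- ===== PRECONDITION & SPEC =====
-- Pre_ excludes exactly the inputs where Python A raises IndexError: empty list or empty first string.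
def Pre_ALLls (lst : List String) : Prop := lst ≠ [] ∧ lst.headD "" ≠ ""
instance (lst : List String) : Decidable (Pre_ALLls lst) := by unfold Pre_ALLls; infer_instance
def pvWitness_ALLls : List String := ["Sab", "a->b"]
def Spec_ALLls (lst : List String) (out : List String) : Prop := out = ALLls_alt lst
instance (lst : List String) (out : List String) : Decidable (Spec_ALLls lst out) := by unfold Spec_ALLls; infer_instance

-- ===== CLAIM (what is proved, stated in full; the proofs are below) =====
def Claim_equal_ALLls : Prop := ∀ (lst : List String), Dom_ALLls lst → Pre_ALLls lst → Spec_ALLls lst (ALLls lst)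

-- ===== LEMMAS AND PROOFS =====

theorem uniqB_nil (start : Char) : uniqB start [] = [] := by simp [uniqB]

theorem uniqB_cons (start c : Char) (cs : List Char) :
    uniqB start (c :: cs) =
      if c = start then uniqB start (cs.filter (fun x => x ≠ c))
      else String.ofList [c] :: uniqB start (cs.filter (fun x => x ≠ c)) := by
  rw [uniqB.eq_def]

theorem mk1_ne_arrow (j : Char) : String.ofList [j] ≠ "->" := by
  intro h
  have := congrArg String.toList h
  simp at this

theorem mk1_inj {a b : Char} : String.ofList [a] = String.ofList [b] ↔ a = b := by
  constructor
  · intro h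
    have := congrArg String.toList h
    simpa using this
  · intro h; rw [h]

theorem filter_comm_ne (p : Char → Bool) (c : Char) (cs : List Char) :
    (cs.filter p).filter (fun x => x ≠ c) = (cs.filter (fun x => x ≠ c)).filter p := by
  rw [List.filter_filter, List.filter_filter]
  exact List.filter_congr (fun x _ => Bool.and_comm _ _)

-- uniqB ignores occurrences of the start symbol
theorem uniqB_filter_start (start : Char) (l : List Char) :
    uniqB start (l.filter (fun x => x ≠ start)) = uniqB start l := by
  induction hn : l.length using Nat.strong_induction_on generalizing l with
  | _ n ih =>
    cases l with
    | nil => rfl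
    | cons c cs =>
      by_cases hc : c = start
      · subst hc
        rw [List.filter_cons_of_neg (by simp)]
        rw [uniqB_cons, if_pos rfl]
      · rw [List.filter_cons_of_pos (by simpa using hc)]
        rw [uniqB_cons, if_neg hc, uniqB_cons, if_neg hc]
        rw [filter_comm_ne]
        rw [ih (cs.filter (fun x => x ≠ c)).length
          (by simpa [← hn] using Nat.lt_succ_of_le (List.length_filter_le _ _))
          _ rfl]

-- A's character loop from accumulator res = res ++ uniqB over the not-yet-seen characters.
theorem foldA_eq_uniqB (start : Char) (cs : List Char) (res : List String) :
    cs.foldl (fun res j =>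
        if String.ofList [j] ≠ "->" ∧ String.ofList [j] ∉ res ∧ String.ofList [j] ≠ String.ofList [start]
        then res ++ [String.ofList [j]] else res) res
    = res ++ uniqB start (cs.filter (fun x => String.ofList [x] ∉ res)) := by
  induction cs generalizing res with
  | nil => simp [uniqB_nil]
  | cons c cs ih =>
    simp only [List.foldl_cons]
    by_cases hres : String.ofList [c] ∈ res
    · rw [if_neg (fun h => h.2.1 hres)]
      rw [List.filter_cons_of_neg (by simpa using hres)]
      exact ih res
    · by_cases hcs : c = start
      · subst hcs
        rw [if_neg (by simp)]
        rw [List.filter_cons_of_pos (by simpa using hres)]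
        rw [uniqB_cons, if_pos rfl]
        rw [uniqB_filter_start]
        exact ih res
      · rw [if_pos ⟨mk1_ne_arrow c, hres, fun h => hcs (mk1_inj.mp h)⟩]
        rw [List.filter_cons_of_pos (by simpa using hres)]
        rw [uniqB_cons, if_neg hcs]
        rw [ih (res ++ [String.ofList [c]])]
        have hfil : (cs.filter (fun x => String.ofList [x] ∉ res)).filter (fun x => x ≠ c)
            = cs.filter (fun x => String.ofList [x] ∉ res ++ [String.ofList [c]]) := by
          rw [List.filter_filter]
          apply List.filter_congr
          intro x _
          by_cases hx : x = c
          · subst hx; simp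
          · simp [hx, mk1_inj]
        rw [hfil]
        simp

theorem foldl_nested_eq_flat (g : List String → Char → List String) (a : List String) (lst : List String) :
    lst.foldl (fun res i => i.toList.foldl g res) a = (lst.flatMap String.toList).foldl g a := by
  induction lst generalizing a with
  | nil => rfl
  | cons x xs ih => simp [List.flatMap_cons, List.foldl_append, ih]

-- ===== VERDICT (by name: the statement is the Claim_ definition above) =====
theorem ALLls_spec : Claim_equal_ALLls := by
  intro lst _ _
  unfold Spec_ALLls ALLls ALLls_alt
  cases h : (PySem.List.pyGet? lst 0).bind (fun s => PySem.Str.pyGet? s 0) with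
  | none => rfl
  | some start =>
    simp only
    rw [foldl_nested_eq_flat]
    rw [foldA_eq_uniqB start (lst.flatMap String.toList) []]
    simp
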